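-- pv_equiv track=rewrite | github.com/District-Navigator/roads_get_and_format | get_roads.py | extract_road_type
-- ===== SOURCE A (Python) =====
-- ROAD_TYPES = [
--     'Avenue', 'Bay', 'Boulevard', 'Circle', 'Court', 'Cove', 'Drive',
--     'Expressway', 'Lane', 'Parkway', 'Place', 'Road', 'Row', 'Spur',
--     'Street', 'Way'
-- ]
--
-- def extract_road_type(road_name):
--     """
--     Extract the road type from a road name by searching right-to-left.
--
--     Searches for road type suffixes (Avenue, Boulevard, Street, etc.) from
--     right to left to avoid false matches. For example, "Circle Road" should
--     return "Road" not "Circle", and "Parkway" should not match "Way".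
--
--     Args:
--         road_name: The full road name (string)
--
--     Returns:
--         str or None: The road type if found, otherwise None
--     """
--     # Search from right to left for road types
--     for road_type in ROAD_TYPES:
--         # Look for the road type at the end of the name, preceded by a space
--         search_pattern = ' ' + road_type
--         if road_name.endswith(search_pattern):
--             return road_type
--         # Also check case-insensitive match
--         if road_name.lower().endswith(search_pattern.lower()):
--             return road_type
--         # Also check if the entire name is just the road type (edge case)
--         if road_name.lower() == road_type.lower():
--             return road_type
--
--     return None
-- ===== SOURCE B (Python) =====
-- ROAD_TYPES = [
--     'Avenue', 'Bay', 'Boulevard', 'Circle', 'Court', 'Cove', 'Drive',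
--     'Expressway', 'Lane', 'Parkway', 'Place', 'Road', 'Row', 'Spur',
--     'Street', 'Way'
-- ]
--
-- LOWER_MAP = {t.lower(): t for t in ROAD_TYPES}
--
-- def extract_road_type(road_name):
--     last = road_name.rsplit(' ', 1)[-1]
--     return LOWER_MAP.get(last.lower())
-- ===== Notes on version B (the rewrite author's own statement) =====
-- stated objective: simpler
-- what changed: Replaced the per-type loop of three endswith/equality checks with extracting the trailing token once (rsplit(' ',1)[-1]) and a single lookup in a precomputed lowercase->canonical dict.
import Mathlib
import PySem

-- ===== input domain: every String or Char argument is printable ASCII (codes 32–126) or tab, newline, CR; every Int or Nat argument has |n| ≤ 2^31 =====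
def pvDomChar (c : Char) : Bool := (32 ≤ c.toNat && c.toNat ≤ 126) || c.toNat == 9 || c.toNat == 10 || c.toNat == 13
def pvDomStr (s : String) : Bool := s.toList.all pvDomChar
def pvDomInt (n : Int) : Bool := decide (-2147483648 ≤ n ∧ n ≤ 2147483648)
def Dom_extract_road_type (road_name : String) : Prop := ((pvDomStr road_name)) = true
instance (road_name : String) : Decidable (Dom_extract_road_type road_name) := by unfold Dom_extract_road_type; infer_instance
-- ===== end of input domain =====

-- B replaces A's per-type loop of endswith checks by one last-token extraction plus one
-- table lookup (objective: simpler); return values are proved identical on all inputs.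

-- ===== PORT A =====
def ROAD_TYPES : List String :=
  ["Avenue", "Bay", "Boulevard", "Circle", "Court", "Cove", "Drive",
   "Expressway", "Lane", "Parkway", "Place", "Road", "Row", "Spur",
   "Street", "Way"]

-- the 'for road_type in ROAD_TYPES' loop with its early returns
def pvLoopA (road_name : List Char) : List String → Option String
  | [] => none
  | road_type :: rest =>
    -- search_pattern = ' ' + road_type
    let search_pattern : List Char := ' ' :: road_type.toList
    if PySem.Chars.endswith road_name search_pattern then some road_type
    else if PySem.Chars.endswith (PySem.Chars.lower road_name) (PySem.Chars.lower search_pattern) then some road_type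
    else if PySem.Chars.lower road_name = PySem.Chars.lower road_type.toList then some road_type
    else pvLoopA road_name rest

def extract_road_type (road_name : String) : Option String :=
  pvLoopA road_name.toList ROAD_TYPES

-- ===== PORT B =====
-- LOWER_MAP = {t.lower(): t for t in ROAD_TYPES} (keys are pairwise distinct, so the
-- comprehension's insert-with-overwrite is plain in-order insertion)
def LOWER_MAP : PySem.Dict (List Char) String :=
  ⟨ROAD_TYPES.map (fun t => (PySem.Chars.lower t.toList, t))⟩

-- road_name.rsplit(' ', 1)[-1]: exact hand port — the segment after the LAST space
-- (the whole string when it contains no space)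
def pvLastTok (s : List Char) : List Char :=
  ((s.reverse.takeWhile (fun c => c != ' ')).reverse)

def extract_road_type_alt (road_name : String) : Option String :=
  PySem.Dict.get? LOWER_MAP (PySem.Chars.lower (pvLastTok road_name.toList))

-- ===== PRECONDITION & SPEC =====
def Spec_extract_road_type (road_name : String) (out : Option String) : Prop := out = extract_road_type_alt road_name
instance (road_name : String) (out : Option String) : Decidable (Spec_extract_road_type road_name out) := by unfold Spec_extract_road_type; infer_instance

-- ===== CLAIM (what is proved, stated in full; the proofs are below) =====
def Claim_equal_extract_road_type : Prop := ∀ (road_name : String), Dom_extract_road_type road_name → Spec_extract_road_type road_name (extract_road_type road_name)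

-- ===== LEMMAS AND PROOFS =====

theorem pvLowerChar_eq_space_iff (c : Char) : PySem.Chars.lowerChar c = ' ' ↔ c = ' ' := by
  unfold PySem.Chars.lowerChar
  split
  · rename_i h
    simp only [PySem.Chars.isupper, Bool.and_eq_true, decide_eq_true_eq] at h
    have h65 : 65 ≤ c.toNat := h.1
    have h90 : c.toNat ≤ 90 := h.2
    constructor
    · intro he
      have ht : (Char.ofNat (c.toNat + 32)).toNat = (' ' : Char).toNat := congrArg Char.toNat he
      rw [Char.toNat_ofNat, if_pos (Or.inl (by omega))] at ht
      have : (' ' : Char).toNat = 32 := rfl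
      omega
    · intro he
      subst he
      have : (' ' : Char).toNat = 32 := rfl
      omega
  · exact Iff.rfl

theorem pvLastTok_lower (s : List Char) :
    pvLastTok (PySem.Chars.lower s) = PySem.Chars.lower (pvLastTok s) := by
  have hp : ((fun c => c != ' ') ∘ PySem.Chars.lowerChar) = (fun c : Char => c != ' ') := by
    funext c
    rw [Function.comp_apply, Bool.eq_iff_iff]
    simp [bne_iff_ne, pvLowerChar_eq_space_iff]
  unfold pvLastTok PySem.Chars.lower
  rw [← List.map_reverse, List.takeWhile_map, List.map_reverse, hp]

-- takeWhile (· != ' ') r = q, for q free of spaces, says exactly: q ++ [' '] is a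
-- prefix of r, or r = q
theorem pvTakeWhile_eq_iff (q : List Char) (hq : ∀ c ∈ q, c ≠ ' ') :
    ∀ r : List Char, (r.takeWhile (fun c => c != ' ') = q ↔ ((q ++ [' ']) <+: r ∨ r = q)) := by
  induction q with
  | nil =>
    intro r
    cases r with
    | nil => simp
    | cons c r' =>
      by_cases hc : c = ' '
      · subst hc; simp
      · simp [hc, List.cons_prefix_cons]
        exact fun h => absurd h.symm hc
  | cons a q' ih =>
    intro r
    have ha : a ≠ ' ' := hq a (by simp)
    have hq' : ∀ c ∈ q', c ≠ ' ' := fun c hc => hq c (by simp [hc])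
    cases r with
    | nil => simp
    | cons c r' =>
      by_cases hc : c = ' '
      · subst hc
        simp [List.cons_prefix_cons, ha.symm]
        rintro rfl
        exact absurd rfl ha
      · have h2 := ih hq' r'
        simp [hc, List.cons_prefix_cons, h2, and_or_left]
        constructor
        · rintro (⟨h1, h3⟩ | ⟨h1, h3⟩)
          · exact Or.inl ⟨h1.symm, h3⟩
          · exact Or.inr ⟨h1, h3⟩
        · rintro (⟨h1, h3⟩ | ⟨h1, h3⟩)
          · exact Or.inl ⟨h1.symm, h3⟩
          · exact Or.inr ⟨h1, h3⟩

-- A's three checks on one road type collapse to: the lowercased last token of the name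
-- equals the lowercased type
theorem pvCond_iff (s t : List Char) (ht : ∀ c ∈ PySem.Chars.lower t, c ≠ ' ') :
    (PySem.Chars.endswith s (' ' :: t) = true ∨
      PySem.Chars.endswith (PySem.Chars.lower s) (PySem.Chars.lower (' ' :: t)) = true ∨
      PySem.Chars.lower s = PySem.Chars.lower t)
    ↔ PySem.Chars.lower (pvLastTok s) = PySem.Chars.lower t := by
  have hlc : PySem.Chars.lowerChar ' ' = ' ' := by decide
  have hl : PySem.Chars.lower (' ' :: t) = ' ' :: PySem.Chars.lower t := by
    simp [PySem.Chars.lower, hlc]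
  have hrhs : PySem.Chars.lower (pvLastTok s) = PySem.Chars.lower t ↔
      ((' ' :: PySem.Chars.lower t) <:+ PySem.Chars.lower s ∨
        PySem.Chars.lower s = PySem.Chars.lower t) := by
    rw [← pvLastTok_lower]
    unfold pvLastTok
    rw [List.reverse_eq_iff,
      pvTakeWhile_eq_iff (PySem.Chars.lower t).reverse (by simpa using ht) (PySem.Chars.lower s).reverse,
      ← List.reverse_cons, List.reverse_prefix, List.reverse_inj]
  rw [hrhs, PySem.Chars.endswith_iff, PySem.Chars.endswith_iff, hl]
  constructor
  · rintro (h | h | h)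
    · left
      have := List.IsSuffix.map PySem.Chars.lowerChar h
      simpa [PySem.Chars.lower, hlc] using this
    · left; exact h
    · right; exact h
  · rintro (h | h)
    · right; left; exact h
    · right; right; exact h

-- A's loop over a list of space-free types is the association-list lookup of the
-- lowercased last token
theorem pvLoopA_eq_lookup (s : List Char) :
    ∀ (L : List String), (∀ t ∈ L, ∀ c ∈ PySem.Chars.lower t.toList, c ≠ ' ') →
    pvLoopA s L =
      PySem.Dict.get? ⟨L.map (fun t => (PySem.Chars.lower t.toList, t))⟩
        (PySem.Chars.lower (pvLastTok s)) := by
  intro L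
  induction L with
  | nil => intro _; simp [pvLoopA, PySem.Dict.get?]
  | cons t rest ih =>
    intro h
    have ht := h t (by simp)
    have hrest := ih (fun u hu => h u (by simp [hu]))
    have hcond := pvCond_iff s t.toList ht
    rw [pvLoopA]
    simp only [PySem.Dict.get?, List.map_cons, List.find?]
    by_cases hc : PySem.Chars.lower (pvLastTok s) = PySem.Chars.lower t.toList
    · have hbeq : (PySem.Chars.lower t.toList == PySem.Chars.lower (pvLastTok s)) = true := by
        simp [hc]
      rw [hbeq]
      rcases hcond.mpr hc with h1 | h1 | h1 <;> simp [h1]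
    · have hbeq : (PySem.Chars.lower t.toList == PySem.Chars.lower (pvLastTok s)) = false := by
        simp; exact fun e => hc e.symm
      rw [hbeq]
      have hnone := hcond.not.mpr hc
      simp only [not_or] at hnone
      simp [hnone.1, hnone.2.1, hnone.2.2, hrest, PySem.Dict.get?]

-- ===== VERDICT (by name: the statement is the Claim_ definition above) =====
theorem extract_road_type_spec : Claim_equal_extract_road_type := by
  intro road_name _
  unfold Spec_extract_road_type extract_road_type extract_road_type_alt LOWER_MAP
  refine pvLoopA_eq_lookup road_name.toList ROAD_TYPES ?_
  have h : ROAD_TYPES.all (fun t => (PySem.Chars.lower t.toList).all (fun c => c != ' ')) = true := by rfl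
  simpa [List.all_eq_true] using h
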